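-- pv_equiv track=rewrite | github.com/R0drig013/vam.eucatur | web_scra_gabri.py | limpa_str_valor
-- ===== SOURCE A (Python) =====
-- def limpa_str(info_pag):
--     valo_limpo = ''
--     for values in info_pag:
--         if values.isdigit():
--             valo_limpo = f'{valo_limpo}' + f'{values}'
--     return valo_limpo
--
-- def limpa_str_valor(valor):
--     valor_limpo = limpa_str(valor)
--     qntd_dig = len(valor_limpo) - 2
--     cont = 0
--     valor_menor = ''
--     valor_maior = ''
--     for splitad in valor_limpo:
--         cont += 1
--         if cont <= qntd_dig:
--             valor_menor = f'{valor_menor}' + splitad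
--         else:
--             valor_maior = f'{valor_maior}' + splitad
--     valor_final = f'{valor_menor}' + '.' + f'{valor_maior}'
--     return valor_final
-- ===== SOURCE B (Python) =====
-- def limpa_str_valor(valor):
--     digits = ''.join(c for c in valor if c.isdigit())
--     return digits[:-2] + '.' + digits[-2:]
-- ===== Notes on version B (the rewrite author's own statement) =====
-- stated objective: simpler
-- what changed: Replaces the filtering loop plus the counter-driven partition loop with a one-line digit filter and two slice expressions (digits[:-2] + '.' + digits[-2:]), eliminating the counter and the two string accumulators.
import Mathlib
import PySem

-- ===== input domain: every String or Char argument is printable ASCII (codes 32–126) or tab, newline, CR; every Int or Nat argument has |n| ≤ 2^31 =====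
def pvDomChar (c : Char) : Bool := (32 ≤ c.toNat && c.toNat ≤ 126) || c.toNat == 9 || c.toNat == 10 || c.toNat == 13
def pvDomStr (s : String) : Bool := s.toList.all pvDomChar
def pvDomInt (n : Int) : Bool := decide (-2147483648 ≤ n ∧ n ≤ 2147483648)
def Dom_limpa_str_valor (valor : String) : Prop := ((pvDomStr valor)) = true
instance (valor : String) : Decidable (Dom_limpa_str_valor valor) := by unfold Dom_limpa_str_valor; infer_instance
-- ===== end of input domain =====

-- B replaces A's counter-driven partition loop with a digit filter and two slices (simpler decomposition).


-- ===== PORT A =====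
-- helper limpa_str: concatenates the digit characters in order
def limpa_str (info_pag : String) : String :=
  String.ofList (info_pag.toList.foldl
    (fun valo_limpo values => if PySem.Chars.isdigit values then valo_limpo ++ [values] else valo_limpo) [])

def limpa_str_valor (valor : String) : String :=
  let valor_limpo := limpa_str valor
  let qntd_dig : Int := PySem.Str.len valor_limpo - 2
  let st := valor_limpo.toList.foldl
    (fun (st : Int × List Char × List Char) splitad =>
      let cont := st.1 + 1
      if cont ≤ qntd_dig then (cont, st.2.1 ++ [splitad], st.2.2)
      else (cont, st.2.1, st.2.2 ++ [splitad]))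
    (0, [], [])
  String.ofList (st.2.1 ++ ['.'] ++ st.2.2)

-- ===== PORT B =====
def limpa_str_valor_alt (valor : String) : String :=
  let digits := valor.toList.filter PySem.Chars.isdigit
  String.ofList (PySem.List.slice digits none (some (-2)) ++ ['.']
             ++ PySem.List.slice digits (some (-2)) none)

-- ===== PRECONDITION & SPEC =====
def Spec_limpa_str_valor (valor : String) (out : String) : Prop := out = limpa_str_valor_alt valor
instance (valor : String) (out : String) : Decidable (Spec_limpa_str_valor valor out) := by unfold Spec_limpa_str_valor; infer_instance

-- ===== CLAIM (what is proved, stated in full; the proofs are below) =====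
def Claim_equal_limpa_str_valor : Prop := ∀ (valor : String), Dom_limpa_str_valor valor → Spec_limpa_str_valor valor (limpa_str_valor valor)

-- ===== LEMMAS AND PROOFS =====

-- A's partition loop with counter starting at c fills menor with the first (q - c) elements and maior with the rest.
theorem partition_foldl (l : List Char) (q c : Int) (m g : List Char) :
    l.foldl
      (fun (st : Int × List Char × List Char) splitad =>
        if st.1 + 1 ≤ q then (st.1 + 1, st.2.1 ++ [splitad], st.2.2)
        else (st.1 + 1, st.2.1, st.2.2 ++ [splitad]))
      (c, m, g)
    = (c + l.length, m ++ l.take (q - c).toNat, g ++ l.drop (q - c).toNat) := by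
  induction l generalizing c m g with
  | nil => simp
  | cons x xs ih =>
    simp only [List.foldl_cons]
    by_cases h : c + 1 ≤ q
    · rw [if_pos h, ih]
      have h1 : (q - c).toNat = (q - (c + 1)).toNat + 1 := by omega
      simp [h1, List.take_succ_cons, List.drop_succ_cons]
      omega
    · rw [if_neg h, ih]
      have h1 : (q - c).toNat = 0 := by omega
      have h2 : (q - (c + 1)).toNat = 0 := by omega
      simp [h1, h2]
      omega

-- ===== VERDICT (by name: the statement is the Claim_ definition above) =====
theorem limpa_str_valor_spec : Claim_equal_limpa_str_valor := by
  intro valor _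
  unfold Spec_limpa_str_valor limpa_str_valor limpa_str_valor_alt limpa_str
  simp only [PySem.List.foldl_append_if_eq_filter, List.nil_append]
  set digits := valor.toList.filter PySem.Chars.isdigit with hd
  simp only [PySem.Str.len, String.toList_ofList]
  rw [partition_foldl]
  rw [PySem.List.slice_to_neg_ofNat digits 2 (by omega),
      PySem.List.slice_from_neg_ofNat digits 2 (by omega)]
  have : ((digits.length : Int) - 2).toNat = digits.length - 2 := by omega
  simp [this]
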